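-- pv_equiv track=rewrite | github.com/Greg3380/NLPCourse | ex4/main.py | count_event_occurrences
-- ===== SOURCE A (Python) =====
-- def count_event_occurrences(bigram_frequency_list):
--     event_occurrences = dict()
--     # word -> (number of occurrences as first element, number of occurrences as second element)
--     for phrase in bigram_frequency_list:
--         a, b = phrase.split(' ')
--         try:
--             event_occurrences[a] = (event_occurrences[a][0] + bigram_frequency_list[phrase], event_occurrences[a][1])
--         except KeyError:
--             event_occurrences[a] = (bigram_frequency_list[phrase], 0)
--         try:
--             event_occurrences[b] = (event_occurrences[b][0], event_occurrences[b][1] + bigram_frequency_list[phrase])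
--         except KeyError:
--             event_occurrences[b] = (0, bigram_frequency_list[phrase])
--     return event_occurrences
-- ===== SOURCE B (Python) =====
-- def count_event_occurrences(bigram_frequency_list):
--     # Staged pipeline: split each phrase once into (first, second, freq) triples,
--     # collect the first-appearance word order, then compute each word's totals by
--     # scanning the triples (nested per-word sums instead of incremental counters).
--     triples = []
--     for phrase, freq in bigram_frequency_list.items():
--         a, b = phrase.split(' ')
--         triples.append((a, b, freq))
--     order = []
--     for a, b, _ in triples:
--         if a not in order:
--             order.append(a)
--         if b not in order:
--             order.append(b)
--     return {w: (sum(f for a, _, f in triples if a == w),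
--                 sum(f for _, b, f in triples if b == w))
--             for w in order}
-- ===== Notes on version B (the rewrite author's own statement) =====
-- stated objective: alternative
-- what changed: B replaces A's single incremental pass that mutates a dict of tuples via try/except KeyError with a staged pipeline: one pass splitting phrases into (first, second, freq) triples, one pass collecting the first-appearance word order, and a final comprehension computing each word's two totals by per-word sums over the triples; Pre_ excludes association lists with duplicate keys (unrepresentable in the Python dict argument) and phrases that do not split on ' ' into exactly two parts, where both A and B raise ValueError.
import Mathlib
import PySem

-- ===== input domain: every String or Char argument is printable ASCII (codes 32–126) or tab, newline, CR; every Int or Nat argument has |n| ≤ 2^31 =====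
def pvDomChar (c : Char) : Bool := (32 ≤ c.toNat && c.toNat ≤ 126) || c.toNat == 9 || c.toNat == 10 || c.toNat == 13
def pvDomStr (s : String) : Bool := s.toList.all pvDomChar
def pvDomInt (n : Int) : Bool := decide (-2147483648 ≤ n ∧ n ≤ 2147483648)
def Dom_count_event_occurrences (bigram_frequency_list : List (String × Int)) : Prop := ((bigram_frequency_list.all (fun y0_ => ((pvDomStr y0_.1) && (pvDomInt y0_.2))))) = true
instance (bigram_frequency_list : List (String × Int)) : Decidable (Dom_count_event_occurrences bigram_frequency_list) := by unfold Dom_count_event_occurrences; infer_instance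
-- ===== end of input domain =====

-- B replaces A's single incremental try/except pass over one dict of tuples by a staged
-- pipeline: split into triples, collect first-appearance word order, then per-word sums
-- over the triples (objective: alternative; not faster).

-- ===== PORT A =====
-- loop body of A: the two try/except updates of event_occurrences, with the
-- KeyError branches modelled by `Dict.get? = none`
def pvStepA (d : PySem.Dict String Int) (ev : PySem.Dict String (Int × Int))
    (p : String × Int) : PySem.Dict String (Int × Int) :=
  match PySem.Str.split? p.1 " " with
  | some [a, b] =>
    match d.get? p.1 with
    | some freq =>
      let ev1 :=
        match ev.get? a with
        | some xy => ev.insert a (xy.1 + freq, xy.2)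
        | none => ev.insert a (freq, 0)
      match ev1.get? b with
      | some xy => ev1.insert b (xy.1, xy.2 + freq)
      | none => ev1.insert b (0, freq)
    | none => ev
  | _ => ev

def count_event_occurrences (bigram_frequency_list : List (String × Int)) : List (String × Int × Int) :=
  let d : PySem.Dict String Int := PySem.Dict.mk bigram_frequency_list
  (d.items.foldl (pvStepA d) PySem.Dict.empty).items

-- ===== PORT B =====
-- stage 1 body of B: `a, b = phrase.split(' ')` appending one triple
-- (malformed phrases, where the Python raises ValueError, contribute nothing; outside Pre_)
def pvF (p : String × Int) : List (String × String × Int) :=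
  match PySem.Str.split? p.1 " " with
  | some [a, b] => [(a, b, p.2)]
  | _ => []

-- stage 2 body of B: the two `if w not in order: order.append(w)` tests
def pvOrderStep (o : List String) (t : String × String × Int) : List String :=
  let o1 := if t.1 ∈ o then o else o ++ [t.1]
  if t.2.1 ∈ o1 then o1 else o1 ++ [t.2.1]

def count_event_occurrences_alt (bigram_frequency_list : List (String × Int)) : List (String × Int × Int) :=
  let triples := bigram_frequency_list.foldl (fun ts p => ts ++ pvF p) []
  let order := triples.foldl pvOrderStep []
  order.map (fun w =>
    (w, ((triples.filter (fun t => t.1 == w)).map (fun t => t.2.2)).sum,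
        ((triples.filter (fun t => t.2.1 == w)).map (fun t => t.2.2)).sum))

-- ===== PRECONDITION & SPEC =====
-- Pre_ excludes association lists with duplicate keys (the argument is a Python dict, in
-- which duplicate keys are unrepresentable) and keys that do not split on ' ' into exactly
-- two parts (there `a, b = phrase.split(' ')` raises ValueError in both A and B).
def Pre_count_event_occurrences (bigram_frequency_list : List (String × Int)) : Prop :=
  (bigram_frequency_list.map (fun p => p.1)).Nodup ∧
  ∀ p ∈ bigram_frequency_list, ((PySem.Str.split? p.1 " ").getD []).length = 2
instance (bigram_frequency_list : List (String × Int)) : Decidable (Pre_count_event_occurrences bigram_frequency_list) := by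
  unfold Pre_count_event_occurrences; infer_instance

def pvWitness_count_event_occurrences : (List (String × Int)) := [("a b", 2), ("b b", 3)]

def Spec_count_event_occurrences (bigram_frequency_list : List (String × Int)) (out : List (String × Int × Int)) : Prop := out = count_event_occurrences_alt bigram_frequency_list
instance (bigram_frequency_list : List (String × Int)) (out : List (String × Int × Int)) : Decidable (Spec_count_event_occurrences bigram_frequency_list out) := by unfold Spec_count_event_occurrences; infer_instance

-- ===== CLAIM (what is proved, stated in full; the proofs are below) =====
def Claim_equal_count_event_occurrences : Prop := ∀ (bigram_frequency_list : List (String × Int)), Dom_count_event_occurrences bigram_frequency_list → Pre_count_event_occurrences bigram_frequency_list → Spec_count_event_occurrences bigram_frequency_list (count_event_occurrences bigram_frequency_list)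

-- ===== LEMMAS AND PROOFS =====

-- A's loop body with the (under Pre_) constant lookup `d.get? p.1` replaced by `p.2`
def pvStepA' (ev : PySem.Dict String (Int × Int)) (p : String × Int) : PySem.Dict String (Int × Int) :=
  match PySem.Str.split? p.1 " " with
  | some [a, b] =>
    let ev1 :=
      match ev.get? a with
      | some xy => ev.insert a (xy.1 + p.2, xy.2)
      | none => ev.insert a (p.2, 0)
    match ev1.get? b with
    | some xy => ev1.insert b (xy.1, xy.2 + p.2)
    | none => ev1.insert b (0, p.2)
  | _ => ev

-- proof-internal counter state: first-position totals, second-position totals, first-seen keys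
def pvStepT (st : PySem.Dict String Int × PySem.Dict String Int × PySem.Dict String Unit)
    (t : String × String × Int) : PySem.Dict String Int × PySem.Dict String Int × PySem.Dict String Unit :=
  (st.1.insert t.1 (st.1.getD t.1 0 + t.2.2),
   st.2.1.insert t.2.1 (st.2.1.getD t.2.1 0 + t.2.2),
   (st.2.2.insert t.1 ()).insert t.2.1 ())

def pvStepB (st : PySem.Dict String Int × PySem.Dict String Int × PySem.Dict String Unit)
    (p : String × Int) : PySem.Dict String Int × PySem.Dict String Int × PySem.Dict String Unit :=
  match PySem.Str.split? p.1 " " with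
  | some [a, b] =>
    (st.1.insert a (st.1.getD a 0 + p.2),
     st.2.1.insert b (st.2.1.getD b 0 + p.2),
     (st.2.2.insert a ()).insert b ())
  | _ => st

-- A's dict, reconstructed from the counter state
def pvRender (f s : PySem.Dict String Int) (o : PySem.Dict String Unit) : PySem.Dict String (Int × Int) :=
  PySem.Dict.mk (o.keys.map (fun w => (w, f.getD w 0, s.getD w 0)))

theorem pv_keys_render (f s : PySem.Dict String Int) (o : PySem.Dict String Unit) :
    (pvRender f s o).keys = o.keys := by
  simp [pvRender, PySem.Dict.keys]

theorem pv_get?_render (f s : PySem.Dict String Int) (o : PySem.Dict String Unit) (a : String)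
    (hno : o.keys.Nodup) :
    (pvRender f s o).get? a = if a ∈ o.keys then some (f.getD a 0, s.getD a 0) else none := by
  by_cases hmem : a ∈ o.keys
  · rw [if_pos hmem]
    apply PySem.Dict.get?_of_mem_items
    · exact List.mem_map.mpr ⟨a, hmem, rfl⟩
    · rw [pv_keys_render]; exact hno
  · rw [if_neg hmem]
    rw [PySem.Dict.get?_eq_none_iff_not_mem_keys, pv_keys_render]
    exact hmem

theorem pv_insert_unit_self (o : PySem.Dict String Unit) (a : String) (hmem : a ∈ o.keys) :
    o.insert a () = o := by
  apply PySem.Dict.ext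
  rw [PySem.Dict.items_insert_of_contains _ _ ((PySem.Dict.contains_iff_mem_keys o a).mpr hmem)]
  conv_rhs => rw [← List.map_id o.items]
  apply List.map_congr_left
  intro p _
  cases p with
  | mk k v => cases v; by_cases hk : k = a <;> simp [hk]

theorem pv_not_contains_of_not_mem {ν : Type} (d : PySem.Dict String ν) (a : String)
    (h : a ∉ d.keys) : d.contains a = false := by
  rw [PySem.Dict.contains_eq_decide_mem_keys]; simp [h]

theorem pv_upd_fst (f s : PySem.Dict String Int) (o : PySem.Dict String Unit) (a : String) (freq : Int)
    (hno : o.keys.Nodup) (hf : ∀ k ∈ f.keys, k ∈ o.keys) (hs : ∀ k ∈ s.keys, k ∈ o.keys) :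
    (match (pvRender f s o).get? a with
     | some xy => (pvRender f s o).insert a (xy.1 + freq, xy.2)
     | none => (pvRender f s o).insert a (freq, 0))
    = pvRender (f.insert a (f.getD a 0 + freq)) s (o.insert a ()) := by
  rw [pv_get?_render f s o a hno]
  by_cases hmem : a ∈ o.keys
  · rw [if_pos hmem]
    rw [pv_insert_unit_self o a hmem]
    apply PySem.Dict.ext
    have hc : (pvRender f s o).contains a = true := by
      rw [PySem.Dict.contains_iff_mem_keys, pv_keys_render]; exact hmem
    rw [PySem.Dict.items_insert_of_contains _ _ hc]
    show ((o.keys.map _).map _) = _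
    rw [List.map_map]
    apply List.map_congr_left
    intro w _
    by_cases hw : w = a <;> simp [hw, PySem.Dict.getD_insert, Function.comp]
  · rw [if_neg hmem]
    apply PySem.Dict.ext
    have hc : (pvRender f s o).contains a = false := by
      apply pv_not_contains_of_not_mem; rw [pv_keys_render]; exact hmem
    rw [PySem.Dict.items_insert_of_not_contains _ _ hc]
    have hoc : o.contains a = false := pv_not_contains_of_not_mem o a hmem
    have hfd : f.getD a 0 = 0 :=
      PySem.Dict.getD_of_not_contains f 0 (pv_not_contains_of_not_mem f a (fun h => hmem (hf a h)))
    have hsd : s.getD a 0 = 0 :=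
      PySem.Dict.getD_of_not_contains s 0 (pv_not_contains_of_not_mem s a (fun h => hmem (hs a h)))
    show (_ ++ _) = (pvRender _ _ _).items
    simp only [pvRender, PySem.Dict.keys, PySem.Dict.items_insert_of_not_contains _ _ hoc]
    rw [List.map_append, List.map_append, List.map_map, List.map_map]
    congr 1
    · apply List.map_congr_left
      intro p hp
      have hpk : p.1 ∈ o.keys := by unfold PySem.Dict.keys; exact List.mem_map.mpr ⟨p, hp, rfl⟩
      have hwa : p.1 ≠ a := fun h => hmem (h ▸ hpk)
      simp [Function.comp, PySem.Dict.getD_insert, hwa]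
    · simp [PySem.Dict.getD_insert, hfd, hsd]

theorem pv_upd_snd (f s : PySem.Dict String Int) (o : PySem.Dict String Unit) (b : String) (freq : Int)
    (hno : o.keys.Nodup) (hf : ∀ k ∈ f.keys, k ∈ o.keys) (hs : ∀ k ∈ s.keys, k ∈ o.keys) :
    (match (pvRender f s o).get? b with
     | some xy => (pvRender f s o).insert b (xy.1, xy.2 + freq)
     | none => (pvRender f s o).insert b (0, freq))
    = pvRender f (s.insert b (s.getD b 0 + freq)) (o.insert b ()) := by
  rw [pv_get?_render f s o b hno]
  by_cases hmem : b ∈ o.keys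
  · rw [if_pos hmem]
    rw [pv_insert_unit_self o b hmem]
    apply PySem.Dict.ext
    have hc : (pvRender f s o).contains b = true := by
      rw [PySem.Dict.contains_iff_mem_keys, pv_keys_render]; exact hmem
    rw [PySem.Dict.items_insert_of_contains _ _ hc]
    show ((o.keys.map _).map _) = _
    rw [List.map_map]
    apply List.map_congr_left
    intro w _
    by_cases hw : w = b <;> simp [hw, PySem.Dict.getD_insert, Function.comp]
  · rw [if_neg hmem]
    apply PySem.Dict.ext
    have hc : (pvRender f s o).contains b = false := by
      apply pv_not_contains_of_not_mem; rw [pv_keys_render]; exact hmem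
    rw [PySem.Dict.items_insert_of_not_contains _ _ hc]
    have hoc : o.contains b = false := pv_not_contains_of_not_mem o b hmem
    have hfd : f.getD b 0 = 0 :=
      PySem.Dict.getD_of_not_contains f 0 (pv_not_contains_of_not_mem f b (fun h => hmem (hf b h)))
    have hsd : s.getD b 0 = 0 :=
      PySem.Dict.getD_of_not_contains s 0 (pv_not_contains_of_not_mem s b (fun h => hmem (hs b h)))
    show (_ ++ _) = (pvRender _ _ _).items
    simp only [pvRender, PySem.Dict.keys, PySem.Dict.items_insert_of_not_contains _ _ hoc]
    rw [List.map_append, List.map_append, List.map_map, List.map_map]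
    congr 1
    · apply List.map_congr_left
      intro p hp
      have hpk : p.1 ∈ o.keys := by unfold PySem.Dict.keys; exact List.mem_map.mpr ⟨p, hp, rfl⟩
      have hwa : p.1 ≠ b := fun h => hmem (h ▸ hpk)
      simp [Function.comp, PySem.Dict.getD_insert, hwa]
    · simp [PySem.Dict.getD_insert, hfd, hsd]

theorem pv_loop (rest : List (String × Int)) (f s : PySem.Dict String Int) (o : PySem.Dict String Unit)
    (hno : o.keys.Nodup) (hf : ∀ k ∈ f.keys, k ∈ o.keys) (hs : ∀ k ∈ s.keys, k ∈ o.keys) :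
    rest.foldl pvStepA' (pvRender f s o) =
      pvRender (rest.foldl pvStepB (f, s, o)).1 (rest.foldl pvStepB (f, s, o)).2.1
        (rest.foldl pvStepB (f, s, o)).2.2 := by
  induction rest generalizing f s o with
  | nil => rfl
  | cons p rest ih =>
    simp only [List.foldl_cons]
    rcases hsp : PySem.Str.split? p.1 " " with _ | l'
    · have hA : pvStepA' (pvRender f s o) p = pvRender f s o := by simp [pvStepA', hsp]
      have hB : pvStepB (f, s, o) p = (f, s, o) := by simp [pvStepB, hsp]
      rw [hA, hB]; exact ih f s o hno hf hs
    · match l' with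
      | [] =>
        have hA : pvStepA' (pvRender f s o) p = pvRender f s o := by simp [pvStepA', hsp]
        have hB : pvStepB (f, s, o) p = (f, s, o) := by simp [pvStepB, hsp]
        rw [hA, hB]; exact ih f s o hno hf hs
      | [a] =>
        have hA : pvStepA' (pvRender f s o) p = pvRender f s o := by simp [pvStepA', hsp]
        have hB : pvStepB (f, s, o) p = (f, s, o) := by simp [pvStepB, hsp]
        rw [hA, hB]; exact ih f s o hno hf hs
      | a :: b :: c :: t =>
        have hA : pvStepA' (pvRender f s o) p = pvRender f s o := by simp [pvStepA', hsp]
        have hB : pvStepB (f, s, o) p = (f, s, o) := by simp [pvStepB, hsp]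
        rw [hA, hB]; exact ih f s o hno hf hs
      | [a, b] =>
        have hno1 : (o.insert a ()).keys.Nodup := PySem.Dict.nodup_keys_insert _ _ _ hno
        have hf1 : ∀ k ∈ (f.insert a (f.getD a 0 + p.2)).keys, k ∈ (o.insert a ()).keys := by
          intro k hk
          rw [PySem.Dict.mem_keys_insert] at hk ⊢
          exact hk.imp id (hf k)
        have hs1 : ∀ k ∈ s.keys, k ∈ (o.insert a ()).keys := by
          intro k hk
          rw [PySem.Dict.mem_keys_insert]
          exact Or.inr (hs k hk)
        have hA : pvStepA' (pvRender f s o) p =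
            pvRender (f.insert a (f.getD a 0 + p.2)) (s.insert b (s.getD b 0 + p.2))
              ((o.insert a ()).insert b ()) := by
          simp only [pvStepA', hsp]
          rw [pv_upd_fst f s o a p.2 hno hf hs]
          rw [pv_upd_snd (f.insert a (f.getD a 0 + p.2)) s (o.insert a ()) b p.2 hno1 hf1 hs1]
        have hB : pvStepB (f, s, o) p =
            (f.insert a (f.getD a 0 + p.2), s.insert b (s.getD b 0 + p.2),
              (o.insert a ()).insert b ()) := by
          simp [pvStepB, hsp]
        rw [hA, hB]
        refine ih _ _ _ (PySem.Dict.nodup_keys_insert _ _ _ hno1) ?_ ?_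
        · intro k hk
          rw [PySem.Dict.mem_keys_insert]
          exact Or.inr (hf1 k hk)
        · intro k hk
          rw [PySem.Dict.mem_keys_insert] at hk ⊢
          exact hk.imp id (fun h => hs1 k h)

-- B-side bridge: folding A's per-pair step equals folding the per-triple step over the triples
theorem pv_stepB_eq_stepT (l : List (String × Int))
    (st : PySem.Dict String Int × PySem.Dict String Int × PySem.Dict String Unit) :
    l.foldl pvStepB st = (l.flatMap pvF).foldl pvStepT st := by
  induction l generalizing st with
  | nil => rfl
  | cons p rest ih =>
    simp only [List.foldl_cons, List.flatMap_cons, List.foldl_append]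
    rcases hsp : PySem.Str.split? p.1 " " with _ | l'
    · rw [show pvStepB st p = st by simp [pvStepB, hsp],
          show pvF p = [] by simp [pvF, hsp]]
      exact ih st
    · match l' with
      | [] =>
        rw [show pvStepB st p = st by simp [pvStepB, hsp],
            show pvF p = [] by simp [pvF, hsp]]
        exact ih st
      | [a] =>
        rw [show pvStepB st p = st by simp [pvStepB, hsp],
            show pvF p = [] by simp [pvF, hsp]]
        exact ih st
      | a :: b :: c :: t =>
        rw [show pvStepB st p = st by simp [pvStepB, hsp],
            show pvF p = [] by simp [pvF, hsp]]
        exact ih st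
      | [a, b] =>
        rw [show pvF p = [(a, b, p.2)] by simp [pvF, hsp]]
        rw [show pvStepB st p = pvStepT st (a, b, p.2) by cases st with
          | mk f rest2 => cases rest2 with
            | mk s o => simp [pvStepB, pvStepT, hsp]]
        exact ih _

-- the first-position counter computes the per-word sum over the triples
theorem pv_getD_fst (ts : List (String × String × Int))
    (f s : PySem.Dict String Int) (o : PySem.Dict String Unit) (w : String) :
    ((ts.foldl pvStepT (f, s, o)).1).getD w 0 =
      f.getD w 0 + ((ts.filter (fun t => t.1 == w)).map (fun t => t.2.2)).sum := by
  induction ts generalizing f s o with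
  | nil => simp
  | cons t rest ih =>
    simp only [List.foldl_cons, pvStepT, List.filter_cons]
    rw [ih]
    by_cases hw : t.1 = w
    · simp [hw]; ring
    · have : (t.1 == w) = false := by simp [hw]
      simp [this, PySem.Dict.getD_insert, Ne.symm hw]

-- the second-position counter computes the per-word sum over the triples
theorem pv_getD_snd (ts : List (String × String × Int))
    (f s : PySem.Dict String Int) (o : PySem.Dict String Unit) (w : String) :
    ((ts.foldl pvStepT (f, s, o)).2.1).getD w 0 =
      s.getD w 0 + ((ts.filter (fun t => t.2.1 == w)).map (fun t => t.2.2)).sum := by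
  induction ts generalizing f s o with
  | nil => simp
  | cons t rest ih =>
    simp only [List.foldl_cons, pvStepT, List.filter_cons]
    rw [ih]
    by_cases hw : t.2.1 = w
    · simp [hw]; ring
    · have : (t.2.1 == w) = false := by simp [hw]
      simp [this, PySem.Dict.getD_insert, Ne.symm hw]

theorem pv_keys_insert_unit (d : PySem.Dict String Unit) (k : String) :
    (d.insert k ()).keys = if k ∈ d.keys then d.keys else d.keys ++ [k] := by
  by_cases hmem : k ∈ d.keys
  · rw [if_pos hmem,
      PySem.Dict.keys_insert_of_contains _ _ ((PySem.Dict.contains_iff_mem_keys d k).mpr hmem)]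
  · rw [if_neg hmem, PySem.Dict.keys_insert_of_not_contains _ _ (pv_not_contains_of_not_mem d k hmem)]

-- the first-seen dict's keys are B's `order` list
theorem pv_keys_ord (ts : List (String × String × Int))
    (f s : PySem.Dict String Int) (o : PySem.Dict String Unit) :
    (ts.foldl pvStepT (f, s, o)).2.2.keys = ts.foldl pvOrderStep o.keys := by
  induction ts generalizing f s o with
  | nil => rfl
  | cons t rest ih =>
    simp only [List.foldl_cons, pvStepT]
    rw [ih]
    have hk : ((o.insert t.1 ()).insert t.2.1 ()).keys = pvOrderStep o.keys t := by
      simp only [pvOrderStep, pv_keys_insert_unit]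
    rw [hk]

-- ===== VERDICT (by name: the statement is the Claim_ definition above) =====
theorem count_event_occurrences_spec : Claim_equal_count_event_occurrences := by
  intro l hdom hpre
  unfold Spec_count_event_occurrences
  obtain ⟨hnd, -⟩ := hpre
  have hkeys : (PySem.Dict.mk l).keys.Nodup := by
    unfold PySem.Dict.keys; exact hnd
  have hcong : ∀ ev, ∀ p ∈ l, pvStepA (PySem.Dict.mk l) ev p = pvStepA' ev p := by
    intro ev p hp
    have hget : (PySem.Dict.mk l).get? p.1 = some p.2 :=
      PySem.Dict.get?_of_mem_items _ (by simpa using hp) hkeys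
    simp [pvStepA, pvStepA', hget]
  show (List.foldl (pvStepA (PySem.Dict.mk l)) PySem.Dict.empty l).items = _
  rw [PySem.List.foldl_congr_mem l (pvStepA (PySem.Dict.mk l)) pvStepA' _ hcong]
  have h0 : (PySem.Dict.empty : PySem.Dict String (Int × Int)) =
      pvRender PySem.Dict.empty PySem.Dict.empty PySem.Dict.empty := rfl
  rw [h0, pv_loop l _ _ _ (by simp [PySem.Dict.keys_empty]) (by simp [PySem.Dict.keys_empty])
    (by simp [PySem.Dict.keys_empty]),
    pv_stepB_eq_stepT]
  have htr : l.foldl (fun ts p => ts ++ pvF p) ([] : List (String × String × Int)) = l.flatMap pvF := by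
    simp [List.flatMap_def]
  show (pvRender _ _ _).items = _
  unfold count_event_occurrences_alt
  rw [htr]
  set T := l.flatMap pvF with hT
  show ((T.foldl pvStepT (PySem.Dict.empty, PySem.Dict.empty, PySem.Dict.empty)).2.2.keys.map _) = _
  rw [pv_keys_ord]
  simp only [PySem.Dict.keys_empty]
  apply List.map_congr_left
  intro w _
  rw [pv_getD_fst, pv_getD_snd]
  simp [PySem.Dict.getD_empty]
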